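-- pv_equiv track=rewrite | github.com/BadWolf1509/licitafacil | backend/services/description_fixer.py | _group_candidates_by_proximity
-- ===== SOURCE A (Python) =====
-- from typing import Dict, List, Optional, Tuple
--
-- def _group_candidates_by_proximity(candidates: List[Dict]) -> List[List[Dict]]:
--     """
--     Agrupa candidatos por proximidade de linhas.
--
--     Se há ocorrências em linhas muito distantes (> 200 linhas de diferença),
--     provavelmente são itens diferentes em seções diferentes do documento.
--
--     Returns:
--         Lista de grupos, onde cada grupo contém candidatos próximos entre si.
--         Grupos ordenados por linha (primeiro grupo = linhas menores).
--     """
--     if len(candidates) <= 1: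
--         return [candidates] if candidates else []
--
--     # Ordenar por linha
--     sorted_candidates = sorted(candidates, key=lambda c: c['linha'])
--
--     # Agrupar por proximidade (máx 200 linhas de diferença)
--     groups = []
--     current_group = [sorted_candidates[0]]
--
--     for i in range(1, len(sorted_candidates)):
--         prev_line = sorted_candidates[i - 1]['linha']
--         curr_line = sorted_candidates[i]['linha']
--
--         if curr_line - prev_line <= 200:
--             current_group.append(sorted_candidates[i])
--         else:
--             groups.append(current_group)
--             current_group = [sorted_candidates[i]]
--
--     groups.append(current_group)
--
--     return groups
-- ===== SOURCE B (Python) =====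
-- def _group_candidates_by_proximity(candidates):
--     """Two-phase: sort, compute the list of breakpoint indices where the
--     sorted lines jump by more than 200, then slice the sorted list between
--     consecutive cuts."""
--     if len(candidates) <= 1:
--         return [candidates] if candidates else []
--     s = sorted(candidates, key=lambda d: d['linha'])
--     cuts = [0]
--     cuts += [i + 1 for i, (p, c) in enumerate(zip(s, s[1:]))
--              if c['linha'] - p['linha'] > 200]
--     cuts.append(len(s))
--     return [s[a:b] for a, b in zip(cuts, cuts[1:])]
-- ===== Notes on version B (the rewrite author's own statement) =====
-- stated objective: alternative
-- what changed: B replaces A's incremental accumulate-and-flush loop with a two-phase decomposition: it first builds an explicit list of breakpoint indices (positions where consecutive sorted lines differ by more than 200, plus 0 and len), then partitions the sorted list by slicing between consecutive cuts.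
import Mathlib
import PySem

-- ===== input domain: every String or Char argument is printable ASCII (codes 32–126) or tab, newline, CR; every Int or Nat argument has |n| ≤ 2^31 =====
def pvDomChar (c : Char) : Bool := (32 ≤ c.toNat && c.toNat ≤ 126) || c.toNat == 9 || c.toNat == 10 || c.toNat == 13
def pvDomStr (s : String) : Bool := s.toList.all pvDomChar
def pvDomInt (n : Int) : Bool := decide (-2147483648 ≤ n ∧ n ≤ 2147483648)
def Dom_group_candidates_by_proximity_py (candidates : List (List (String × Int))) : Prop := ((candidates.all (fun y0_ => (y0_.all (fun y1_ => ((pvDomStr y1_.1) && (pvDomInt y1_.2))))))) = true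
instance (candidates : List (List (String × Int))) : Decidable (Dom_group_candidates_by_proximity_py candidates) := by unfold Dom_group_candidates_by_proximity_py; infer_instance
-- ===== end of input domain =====

-- B replaces A's accumulate-and-flush loop by a two-phase decomposition:
-- an explicit breakpoint-index list, then slicing between consecutive cuts.

-- c['linha'] on the association list (first match); total via getD 0, only used
-- under Pre_ (key present) or behind the len<=1 guard, exactly as in Python.
def pvLinha (c : List (String × Int)) : Int :=
  ((c.find? (fun p => p.1 == "linha")).map Prod.snd).getD 0

-- ===== PORT A =====
-- A's for-loop over range(1, len): state = (groups, current_group, previous element)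
def pvALoop (groups : List (List (List (String × Int)))) (cur : List (List (String × Int)))
    (prev : List (String × Int)) (rest : List (List (String × Int))) :
    List (List (List (String × Int))) :=
  match rest with
  | [] => groups ++ [cur]                               -- groups.append(current_group); return groups
  | c :: t =>
    if pvLinha c - pvLinha prev ≤ 200 then
      pvALoop groups (cur ++ [c]) c t                   -- current_group.append(...)
    else
      pvALoop (groups ++ [cur]) [c] c t                 -- flush, start new group

def group_candidates_by_proximity_py (candidates : List (List (String × Int))) :
    List (List (List (String × Int))) :=
  if candidates.length ≤ 1 then
    (if candidates = [] then [] else [candidates])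
  else
    match PySem.List.sorted candidates pvLinha false with
    | [] => []                                          -- unreachable: sorted of a nonempty list is nonempty
    | c0 :: rest => pvALoop [] [c0] c0 rest

-- ===== PORT B =====
def group_candidates_by_proximity_py_alt (candidates : List (List (String × Int))) :
    List (List (List (String × Int))) :=
  if candidates.length ≤ 1 then
    (if candidates = [] then [] else [candidates])
  else
    let s := PySem.List.sorted candidates pvLinha false
    -- cuts = [0] + [i + 1 for i, (p, c) in enumerate(zip(s, s[1:])) if c['linha'] - p['linha'] > 200] + [len(s)]
    let cuts : List Int :=
      (0 :: (PySem.List.enumerate (s.zip (PySem.List.slice s (some 1) none)) 0).filterMap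
          (fun ic => if pvLinha ic.2.2 - pvLinha ic.2.1 > 200 then some (ic.1 + 1) else none))
        ++ [(s.length : Int)]
    -- [s[a:b] for a, b in zip(cuts, cuts[1:])]
    (cuts.zip (PySem.List.slice cuts (some 1) none)).map
      (fun ab => PySem.List.slice s (some ab.1) (some ab.2))

-- ===== PRECONDITION & SPEC =====
-- Pre_ excludes exactly the inputs where Python A raises KeyError: two or more
-- candidates and some candidate without a 'linha' key (with len <= 1 no lookup happens).
def Pre_group_candidates_by_proximity_py (candidates : List (List (String × Int))) : Prop :=
  candidates.length ≤ 1 ∨ (candidates.all (fun c => c.any (fun p => p.1 == "linha"))) = true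
instance (candidates : List (List (String × Int))) : Decidable (Pre_group_candidates_by_proximity_py candidates) := by unfold Pre_group_candidates_by_proximity_py; infer_instance

def pvWitness_group_candidates_by_proximity_py : (List (List (String × Int))) :=
  [[("linha", 1), ("valor", 7)], [("linha", 300)]]

def Spec_group_candidates_by_proximity_py (candidates : List (List (String × Int))) (out : List (List (List (String × Int)))) : Prop := out = group_candidates_by_proximity_py_alt candidates
instance (candidates : List (List (String × Int))) (out : List (List (List (String × Int)))) : Decidable (Spec_group_candidates_by_proximity_py candidates out) := by unfold Spec_group_candidates_by_proximity_py; infer_instance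

-- ===== CLAIM (what is proved, stated in full; the proofs are below) =====
def Claim_equal_group_candidates_by_proximity_py : Prop := ∀ (candidates : List (List (String × Int))), Dom_group_candidates_by_proximity_py candidates → Pre_group_candidates_by_proximity_py candidates → Spec_group_candidates_by_proximity_py candidates (group_candidates_by_proximity_py candidates)

-- ===== LEMMAS AND PROOFS =====

-- canonical one-step grouping (proof-side intermediary both ports are reduced to)
def pvBStep (c : List (String × Int)) (groups : List (List (List (String × Int)))) :
    List (List (List (String × Int))) :=
  match groups with
  | (h :: g) :: gs =>
    if pvLinha h - pvLinha c ≤ 200 then (c :: h :: g) :: gs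
    else [c] :: (h :: g) :: gs
  | [] :: gs => [c] :: [] :: gs
  | [] => [[c]]

-- prepend-into-first-group, as a named operation (proof-side helper)
def pvConsHead (a : List (String × Int)) (gr : List (List (List (String × Int)))) :
    List (List (List (String × Int))) :=
  match gr with
  | g :: gs => (a :: g) :: gs
  | [] => [[a]]

-- A's loop only ever appends to `groups`
theorem pvALoop_accum (rest : List (List (String × Int)))
    (groups : List (List (List (String × Int)))) (cur : List (List (String × Int)))
    (prev : List (String × Int)) :
    pvALoop groups cur prev rest = groups ++ pvALoop [] cur prev rest := by
  induction rest generalizing groups cur prev with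
  | nil => simp [pvALoop]
  | cons c t ih =>
    simp only [pvALoop]
    split_ifs with h
    · exact ih groups (cur ++ [c]) c
    · rw [ih (groups ++ [cur]) [c] c, ih ([] ++ [cur]) [c] c]
      simp

-- prepending to the current group prepends to the first emitted group
theorem pvALoop_cons (rest : List (List (String × Int)))
    (prev a : List (String × Int)) (cur : List (List (String × Int))) :
    pvALoop [] (a :: cur) prev rest = pvConsHead a (pvALoop [] cur prev rest) := by
  induction rest generalizing cur prev with
  | nil => simp [pvALoop, pvConsHead]
  | cons c t ih =>
    simp only [pvALoop]
    split_ifs with h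
    · rw [List.cons_append]
      exact ih c (cur ++ [c])
    · rw [pvALoop_accum t ([] ++ [a :: cur]) [c] c, pvALoop_accum t ([] ++ [cur]) [c] c]
      simp [pvConsHead]

-- A's loop from a fresh one-element group equals the canonical right fold
theorem pvALoop_eq_foldr (rest : List (List (String × Int))) (c : List (String × Int)) :
    pvALoop [] [c] c rest = (c :: rest).foldr pvBStep [] := by
  induction rest generalizing c with
  | nil => simp [pvALoop, pvBStep]
  | cons d t ih =>
    have hshape : ∃ g gs, pvALoop [] [d] d t = (d :: g) :: gs := by
      rw [pvALoop_cons t d d []]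
      cases h : pvALoop [] [] d t with
      | nil => exact ⟨[], [], rfl⟩
      | cons g gs => exact ⟨g, gs, rfl⟩
    obtain ⟨g, gs, hg⟩ := hshape
    simp only [List.foldr_cons]
    rw [← List.foldr_cons (f := pvBStep), ← ih d, hg]
    simp only [pvALoop]
    split_ifs with h
    · rw [show ([c] ++ [d] : List (List (String × Int))) = c :: [d] from rfl,
        pvALoop_cons t d c [d], hg]
      simp [pvConsHead, pvBStep, h]
    · rw [pvALoop_accum t ([] ++ [[c]]) [d] d, hg]
      simp [pvBStep, h]

-- ---- Nat-level mirror of B's cut computation ----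

def pvGapsN (ps : List ((List (String × Int)) × (List (String × Int)))) (k : Nat) : List Nat :=
  match ps with
  | [] => []
  | p :: t => (if pvLinha p.2 - pvLinha p.1 > 200 then [k + 1] else []) ++ pvGapsN t (k + 1)

def pvCutsN (s : List (List (String × Int))) : List Nat :=
  (0 :: pvGapsN (s.zip s.tail) 0) ++ [s.length]

def pvSliceN (s : List (List (String × Int))) (ab : Nat × Nat) : List (List (String × Int)) :=
  (s.drop ab.1).take (ab.2 - ab.1)

def pvPart (s : List (List (String × Int))) : List (List (List (String × Int))) :=
  ((pvCutsN s).zip (pvCutsN s).tail).map (pvSliceN s)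

-- successive slices, as a recursion on the cut list (a = left cut, cs = remaining cuts)
def pvSl (s : List (List (String × Int))) (a : Nat) (cs : List Nat) :
    List (List (List (String × Int))) :=
  match cs with
  | [] => []
  | b :: cs' => pvSliceN s (a, b) :: pvSl s b cs'

-- B's enumerate/filterMap gap comprehension is the cast of the Nat-level one
theorem pvGaps_cast (ps : List ((List (String × Int)) × (List (String × Int)))) (k : Nat) :
    (PySem.List.enumerate ps (k : Int)).filterMap
        (fun ic => if pvLinha ic.2.2 - pvLinha ic.2.1 > 200 then some (ic.1 + 1) else none)
      = (pvGapsN ps k).map Int.ofNat := by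
  induction ps generalizing k with
  | nil => simp [PySem.List.enumerate_nil, pvGapsN]
  | cons p t ih =>
    rw [PySem.List.enumerate_cons]
    simp only [List.filterMap_cons, pvGapsN]
    split_ifs with h
    · rw [show ((k : Int) + 1) = ((k + 1 : Nat) : Int) by push_cast; ring, ih (k + 1)]
      simp
    · rw [show ((k : Int) + 1) = ((k + 1 : Nat) : Int) by push_cast; ring, ih (k + 1)]
      simp

theorem pvGapsN_shift (ps : List ((List (String × Int)) × (List (String × Int)))) (k : Nat) :
    pvGapsN ps (k + 1) = (pvGapsN ps k).map (· + 1) := by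
  induction ps generalizing k with
  | nil => rfl
  | cons p t ih =>
    simp only [pvGapsN, List.map_append, ih (k + 1), ih k]
    split_ifs <;> simp

theorem pvGapsN_ge (ps : List ((List (String × Int)) × (List (String × Int)))) (k : Nat)
    (x : Nat) (hx : x ∈ pvGapsN ps k) : k + 1 ≤ x := by
  induction ps generalizing k with
  | nil => simp [pvGapsN] at hx
  | cons p t ih =>
    simp only [pvGapsN, List.mem_append] at hx
    rcases hx with hx | hx
    · split_ifs at hx <;> simp_all
    · have := ih (k + 1) hx; omega

-- zip-with-successor over the cut list is the recursion pvSl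
theorem pvZip_eq_pvSl (s : List (List (String × Int))) (cs : List Nat) (a : Nat) :
    ((a :: cs).zip cs).map (pvSliceN s) = pvSl s a cs := by
  induction cs generalizing a with
  | nil => rfl
  | cons b cs' ih =>
    simp only [List.zip_cons_cons, List.map_cons, pvSl]
    rw [ih b]

-- slicing with all cuts shifted by one, over a cons, is slicing the tail
theorem pvSl_shift (s : List (List (String × Int))) (c : List (String × Int))
    (cs : List Nat) (a : Nat) :
    pvSl (c :: s) (a + 1) (cs.map (· + 1)) = pvSl s a cs := by
  induction cs generalizing a with
  | nil => rfl
  | cons b cs' ih =>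
    simp only [List.map_cons, pvSl]
    rw [ih b]
    simp [pvSliceN, Nat.succ_sub_succ]

theorem pvPart_eq_pvSl (s : List (List (String × Int))) (tc : List Nat)
    (h : pvCutsN s = 0 :: tc) : pvPart s = pvSl s 0 tc := by
  simp only [pvPart, h, List.tail_cons]
  exact pvZip_eq_pvSl s tc 0

-- the Nat-level two-phase partition equals the canonical fold, on nonempty lists
theorem pvPart_eq_foldr (t : List (List (String × Int))) (c : List (String × Int)) :
    pvPart (c :: t) = (c :: t).foldr pvBStep [] := by
  induction t generalizing c with
  | nil => simp [pvPart, pvCutsN, pvGapsN, pvSliceN, pvBStep]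
  | cons d t' ih =>
    have htc : pvCutsN (d :: t') = 0 :: (pvGapsN ((d :: t').zip t') 0 ++ [t'.length + 1]) := by
      simp [pvCutsN]
    set g := pvGapsN ((d :: t').zip t') 0 with hgdef
    obtain ⟨e, r, her⟩ : ∃ e r, g ++ [t'.length + 1] = e :: r := by
      cases h : g ++ [t'.length + 1] with
      | nil => simp at h
      | cons e r => exact ⟨e, r, rfl⟩
    have he1 : 1 ≤ e := by
      have : e ∈ g ++ [t'.length + 1] := by rw [her]; exact List.mem_cons_self ..
      rcases List.mem_append.1 this with h | h
      · exact pvGapsN_ge _ 0 e h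
      · simp at h; omega
    obtain ⟨e', rfl⟩ : ∃ e', e = e' + 1 := ⟨e - 1, by omega⟩
    have hih : (d :: t' : List (List (String × Int))).foldr pvBStep []
        = (d :: List.take e' t') :: pvSl (d :: t') (e' + 1) r := by
      rw [← ih d, pvPart_eq_pvSl (d :: t') _ (by rw [htc, her]), pvSl]
      simp [pvSliceN, List.take_succ_cons]
    have hcuts : pvCutsN (c :: d :: t')
        = 0 :: ((if pvLinha d - pvLinha c > 200 then [1] else [])
            ++ ((g ++ [t'.length + 1]).map (· + 1))) := by
      simp only [pvCutsN, List.tail_cons, List.zip_cons_cons, pvGapsN, List.length_cons]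
      rw [pvGapsN_shift _ 0, ← hgdef]
      simp
    rw [pvPart_eq_pvSl (c :: d :: t') _ hcuts, List.foldr_cons, hih]
    by_cases hgap : pvLinha d - pvLinha c > 200
    · rw [if_pos hgap]
      simp only [List.singleton_append, pvSl]
      rw [show (1 : Nat) = 0 + 1 from rfl, pvSl_shift (d :: t') c _ 0, her,
        ← pvPart_eq_pvSl (d :: t') _ (by rw [htc, her]), ih d, hih]
      have : ¬ (pvLinha d - pvLinha c ≤ 200) := by omega
      simp [pvBStep, pvSliceN, this]
    · rw [if_neg hgap]
      rw [her]
      simp only [List.nil_append, List.map_cons, pvSl]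
      rw [pvSl_shift (d :: t') c r (e' + 1)]
      have : pvLinha d - pvLinha c ≤ 200 := by omega
      simp [pvBStep, pvSliceN, this, List.take_succ_cons]

-- cast bridge: the Int-valued zip-and-slice pass over cast cuts is pvSl
theorem pvCast_slices (s : List (List (String × Int))) (cs : List Nat) (a : Nat) :
    ((((a :: cs).map Int.ofNat).zip (((a :: cs).map Int.ofNat).tail)).map
        (fun ab => PySem.List.slice s (some ab.1) (some ab.2))) = pvSl s a cs := by
  induction cs generalizing a with
  | nil => rfl
  | cons b cs' ih =>
    have hb := ih b
    simp only [List.map_cons, List.tail_cons, List.zip_cons_cons] at hb ⊢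
    rw [hb]
    simp only [pvSl]
    congr 1
    simp [pvSliceN, Int.ofNat_eq_natCast, PySem.List.slice_natCast]

theorem pv_main (candidates : List (List (String × Int))) :
    group_candidates_by_proximity_py candidates = group_candidates_by_proximity_py_alt candidates := by
  unfold group_candidates_by_proximity_py group_candidates_by_proximity_py_alt
  split_ifs with h1 h2
  · rfl
  · rfl
  · cases hs : PySem.List.sorted candidates pvLinha false with
    | nil =>
      rw [PySem.List.sorted_eq_nil_iff] at hs
      subst hs; simp at h1
    | cons c0 rest =>
      show pvALoop [] [c0] c0 rest =
        ((((0 : Int) :: ((PySem.List.enumerate ((c0 :: rest).zip (PySem.List.slice (c0 :: rest) (some 1) none)) 0).filterMap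
            (fun ic : Int × ((List (String × Int)) × (List (String × Int))) =>
              if pvLinha ic.2.2 - pvLinha ic.2.1 > 200 then some (ic.1 + 1) else none)))
          ++ [((c0 :: rest).length : Int)]).zip (PySem.List.slice (((0 : Int) :: ((PySem.List.enumerate ((c0 :: rest).zip (PySem.List.slice (c0 :: rest) (some 1) none)) 0).filterMap
            (fun ic : Int × ((List (String × Int)) × (List (String × Int))) =>
              if pvLinha ic.2.2 - pvLinha ic.2.1 > 200 then some (ic.1 + 1) else none)))
          ++ [((c0 :: rest).length : Int)]) (some 1) none)).map
          (fun ab => PySem.List.slice (c0 :: rest) (some ab.1) (some ab.2))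
      rw [pvALoop_eq_foldr rest c0, ← pvPart_eq_foldr rest c0]
      rw [PySem.List.slice_from_one (c0 :: rest)]
      rw [show (0 : Int) = ((0 : Nat) : Int) from rfl]
      rw [pvGaps_cast ((c0 :: rest).zip (c0 :: rest).tail) 0]
      rw [show ((((0 : Nat) : Int)) :: (pvGapsN ((c0 :: rest).zip (c0 :: rest).tail) 0).map Int.ofNat)
            ++ [((c0 :: rest).length : Int)]
          = ((0 :: (pvGapsN ((c0 :: rest).zip (c0 :: rest).tail) 0 ++ [(c0 :: rest).length])).map Int.ofNat) by
        simp [Int.ofNat_eq_natCast]]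
      rw [PySem.List.slice_from_one]
      rw [pvCast_slices (c0 :: rest) (pvGapsN ((c0 :: rest).zip (c0 :: rest).tail) 0 ++ [(c0 :: rest).length]) 0]
      exact pvPart_eq_pvSl (c0 :: rest) _ (by simp [pvCutsN])

-- ===== VERDICT (by name: the statement is the Claim_ definition above) =====
theorem group_candidates_by_proximity_py_spec : Claim_equal_group_candidates_by_proximity_py := by
  intro candidates _ _
  exact pv_main candidates
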